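-- pv_equiv track=rewrite | github.com/altoid/misc_puzzles | py/prime_bits/solution.py | decorate_zeroes
-- ===== SOURCE A (Python) =====
-- def get_bits(n):
--     """
--     return a list of 0s and 1s corresponding to the bits in n.  the element at position 0
--     is the most significant bit.
--     """
--     binstr = bin(n)[2:]
--     binstr = list(binstr)
--     return list(map(int, binstr))
--
-- def decorate_zeroes(width, n):
--     """
--     given a bit vector, create an array of integers that shows, for each 0 bit position, the number
--     of 1 bits from the least significant bit up to and including that position.  put another way,
--     show the number of 1 bits to the right of, and including, that position.
--
--     11  10   9   8   7   6   5   4   3   2   1   0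
--     +---+---+---+---+---+---+---+---+---+---+---+---+
--     |   |   |   | 1 |   | 1 | 1 |   |   | 1 | 1 |   |
--     +---+---+---+---+---+---+---+---+---+---+---+---+
--       5   5   5   0   4   0   0   2   2   0   0   0
--
--     Note:  currently puts 0 in the location of each 1 bit.  there isn't a need to bit-count those too.
--     """
--     bits = get_bits(n)
--     nbits = len(bits)
--
--     # reverse the bits so that the list is easier to work with.
--     bits = bits[::-1]
--
--     decoration = [0] * nbits
--
--     ones_seen = 0
--     for i in range(len(bits)):
--         if bits[i] == 1:
--             ones_seen += 1
--         else:
--             decoration[i] = ones_seen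
--
--     if width > nbits:
--         buffer = [sum(bits)] * (width - nbits)
--         decoration += buffer
--
--     return decoration
-- ===== SOURCE B (Python) =====
-- def decorate_zeroes(width, n):
--     # Bit-arithmetic formulation: no digit list at all.  For each position i,
--     # a 0 bit is labelled with popcount(n & ((1 << i) - 1)) -- the number of
--     # 1 bits strictly below it -- and a 1 bit with 0.
--     nbits = max(n.bit_length(), 1)
--     out = [0 if (n >> i) & 1 else bin(n & ((1 << i) - 1)).count('1')
--            for i in range(nbits)]
--     if width > nbits:
--         out += [bin(n).count('1')] * (width - nbits)
--     return out
-- ===== Notes on version B (the rewrite author's own statement) =====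
-- stated objective: alternative
-- what changed: Replaces A's digit-list construction (get_bits, reverse, index loop writing ones-seen into a preallocated array) with a direct bit-arithmetic formulation: for each position i of range(bit_length) a zero bit is labelled popcount(n & ((1<<i)-1)) via shift/mask, with no bit list built at all.
import Mathlib
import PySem

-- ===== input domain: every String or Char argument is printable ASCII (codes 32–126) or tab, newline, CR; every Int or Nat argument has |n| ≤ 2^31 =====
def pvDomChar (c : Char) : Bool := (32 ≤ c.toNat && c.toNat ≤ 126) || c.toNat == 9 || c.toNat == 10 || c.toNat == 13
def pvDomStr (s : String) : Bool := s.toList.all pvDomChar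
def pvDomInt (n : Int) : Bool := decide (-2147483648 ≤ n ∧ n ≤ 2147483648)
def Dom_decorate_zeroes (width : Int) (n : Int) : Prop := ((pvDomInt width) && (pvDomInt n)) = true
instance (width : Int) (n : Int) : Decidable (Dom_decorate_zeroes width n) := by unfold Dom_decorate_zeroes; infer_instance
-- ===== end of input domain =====

-- B drops A's digit-list pipeline (get_bits, reverse, index loop writing ones-seen into a
-- preallocated array) for a direct bit-arithmetic formulation: each position i of
-- range(bit_length) is labelled 0 on a 1 bit and popcount(n & ((1<<i)-1)) on a 0 bit;
-- an alternative formulation, not claimed faster. Pre_ excludes n < 0, where A raises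
-- ValueError (int('b') while parsing bin(-k)[2:]).


-- ===== PORT A =====
-- binary digits of a positive Nat, LSB first (helper for the port of bin(n)[2:])
def getBitsAux : Nat → List Int
  | 0 => []
  | n+1 => (((n+1) % 2 : Nat) : Int) :: getBitsAux ((n+1)/2)
decreasing_by exact Nat.div_lt_self (Nat.succ_pos n) (by norm_num)

-- port of get_bits: bin(n)[2:] digits, MSB first; exact for n ≥ 0 (n < 0 raises, excluded by Pre_)
def get_bits (n : Int) : List Int :=
  if n = 0 then [0] else (getBitsAux n.toNat).reverse

def decorate_zeroes (width : Int) (n : Int) : List Int :=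
  let bits := get_bits n
  let nbits : Int := (bits.length : Int)
  let bitsR := bits.reverse          -- bits[::-1], exact
  let res := (List.range bitsR.length).foldl
      (fun (st : List Int × Int) i =>
        if bitsR.getD i 0 == 1 then (st.1, st.2 + 1) else (st.1.set i st.2, st.2))
      (List.replicate bitsR.length (0 : Int), (0 : Int))
  let decoration := res.1
  if nbits < width then decoration ++ List.replicate (width - nbits).toNat bitsR.sum
  else decoration

-- ===== PORT B =====
-- bin(x).count('1'): number of 1 bits of a nonnegative int
def popcount (x : Nat) : Nat := if x = 0 then 0 else x % 2 + popcount (x / 2)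
decreasing_by exact Nat.div_lt_self (Nat.pos_of_ne_zero (by assumption)) (by norm_num)

-- n.bit_length() for n ≥ 0
def bitLength (x : Nat) : Nat := if x = 0 then 0 else bitLength (x / 2) + 1
decreasing_by exact Nat.div_lt_self (Nat.pos_of_ne_zero (by assumption)) (by norm_num)

-- exact for n ≥ 0 (n < 0 is excluded by Pre_, A raises there)
def decorate_zeroes_alt (width : Int) (n : Int) : List Int :=
  let m := n.toNat
  let nbits := max (bitLength m) 1
  let out := (List.range nbits).map (fun i =>
      if (m >>> i) &&& 1 == 1 then (0 : Int) else (popcount (m &&& (1 <<< i - 1)) : Int))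
  if (nbits : Int) < width then out ++ List.replicate (width - (nbits : Int)).toNat (popcount m : Int)
  else out

-- ===== PRECONDITION & SPEC =====
-- Pre_ excludes n < 0, on which A raises ValueError (int('b') while parsing bin(-k)[2:]).
def Pre_decorate_zeroes (width : Int) (n : Int) : Prop := 0 ≤ n
instance (width : Int) (n : Int) : Decidable (Pre_decorate_zeroes width n) := by unfold Pre_decorate_zeroes; infer_instance
def pvWitness_decorate_zeroes : Int × Int := (8, 5)

def Spec_decorate_zeroes (width : Int) (n : Int) (out : List Int) : Prop := out = decorate_zeroes_alt width n
instance (width : Int) (n : Int) (out : List Int) : Decidable (Spec_decorate_zeroes width n out) := by unfold Spec_decorate_zeroes; infer_instance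

-- ===== CLAIM (what is proved, stated in full; the proofs are below) =====
def Claim_equal_decorate_zeroes : Prop := ∀ (width : Int) (n : Int), Dom_decorate_zeroes width n → Pre_decorate_zeroes width n → Spec_decorate_zeroes width n (decorate_zeroes width n)

-- ===== LEMMAS AND PROOFS =====

-- the common specification: for an LSB-first list r, gSpec r c labels each non-1 entry
-- with the count of 1s strictly below it (starting from c), and 1 entries with 0
def gSpec : List Int → Int → List Int
  | [], _ => []
  | b :: t, c => if b == 1 then 0 :: gSpec t (c + 1) else c :: gSpec t c

def onesI : List Int → Int
  | [] => 0
  | b :: t => (if b == 1 then 1 else 0) + onesI t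

-- the A-side loop, lifted over a cons of the decoration array
theorem foldA_lift (t : List Int) (b : Int) (xs : List Nat) : ∀ (x : Int) (d : List Int) (c : Int),
    xs.foldl (fun (st : List Int × Int) i =>
        if (b :: t).getD (i + 1) 0 == 1 then (st.1, st.2 + 1) else (st.1.set (i + 1) st.2, st.2))
      (x :: d, c)
    = ((xs.foldl (fun (st : List Int × Int) i =>
          if t.getD i 0 == 1 then (st.1, st.2 + 1) else (st.1.set i st.2, st.2)) (d, c)).1.cons x,
       (xs.foldl (fun (st : List Int × Int) i =>
          if t.getD i 0 == 1 then (st.1, st.2 + 1) else (st.1.set i st.2, st.2)) (d, c)).2) := by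
  induction xs with
  | nil => intro x d c; rfl
  | cons i xs ih =>
    intro x d c
    simp only [List.foldl_cons, List.getD_cons_succ]
    by_cases h : t.getD i 0 == 1
    · rw [if_pos h, if_pos h]; exact ih x d (c + 1)
    · rw [if_neg h, if_neg h, List.set_cons_succ]; exact ih x (d.set i c) c

-- A's loop computes gSpec
theorem foldA (r : List Int) : ∀ c,
    (List.range r.length).foldl
      (fun (st : List Int × Int) i =>
        if r.getD i 0 == 1 then (st.1, st.2 + 1) else (st.1.set i st.2, st.2))
      (List.replicate r.length (0 : Int), c)
    = (gSpec r c, c + onesI r) := by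
  induction r with
  | nil => intro c; simp [gSpec, onesI]
  | cons b t ih =>
    intro c
    rw [List.length_cons, List.range_succ_eq_map]
    simp only [List.foldl_cons, List.foldl_map, Nat.succ_eq_add_one]
    by_cases hb : b == 1
    · simp only [List.replicate_succ, List.getD_cons_zero, hb, if_pos]
      rw [foldA_lift, ih (c + 1)]
      simp [gSpec, onesI, hb]; ring
    · simp only [List.replicate_succ, List.getD_cons_zero, hb, if_false, Bool.false_eq_true,
        List.set_cons_zero]
      rw [foldA_lift, ih c]
      simp [gSpec, onesI, hb]

theorem popcount_zero : popcount 0 = 0 := by rw [popcount]; rfl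

theorem sum_getBitsAux (m : Nat) : (getBitsAux m).sum = onesI (getBitsAux m) := by
  induction m using getBitsAux.induct with
  | case1 => simp [getBitsAux, onesI]
  | case2 k ih =>
    rw [getBitsAux]
    rcases Nat.mod_two_eq_zero_or_one (k+1) with h | h <;> simp [onesI, h, ih]

theorem onesI_getBitsAux (m : Nat) : onesI (getBitsAux m) = (popcount m : Int) := by
  induction m using getBitsAux.induct with
  | case1 => simp [getBitsAux, onesI, popcount_zero]
  | case2 k ih =>
    rw [getBitsAux, popcount]
    rcases Nat.mod_two_eq_zero_or_one (k+1) with h | h <;>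
      simp [onesI, h, ih]

theorem len_getBitsAux (m : Nat) : (getBitsAux m).length = bitLength m := by
  induction m using getBitsAux.induct with
  | case1 => simp [getBitsAux, bitLength]
  | case2 k ih => rw [getBitsAux, bitLength]; simp [ih]

theorem bitLength_pos (m : Nat) (h : m ≠ 0) : 1 ≤ bitLength m := by
  rw [bitLength, if_neg h]; omega

theorem popcount_bit (a b : Nat) (ha : a < 2) : popcount (a + 2 * b) = a + popcount b := by
  by_cases h0 : a + 2 * b = 0
  · have : a = 0 ∧ b = 0 := by omega
    simp [this.1, this.2, popcount_zero]
  · rw [popcount, if_neg h0]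
    have h1 : (a + 2 * b) % 2 = a := by omega
    have h2 : (a + 2 * b) / 2 = b := by omega
    rw [h1, h2]

theorem mod_pow_succ_two (m i : Nat) : m % 2 ^ (i + 1) = m % 2 + 2 * (m / 2 % 2 ^ i) := by
  have hk : 0 < 2 ^ i := Nat.two_pow_pos i
  have hm : m = (m % 2 + 2 * (m / 2 % 2 ^ i)) + (2 * 2 ^ i) * (m / 2 / 2 ^ i) :=
    calc m = m % 2 + 2 * (m / 2) := (Nat.mod_add_div m 2).symm
    _ = m % 2 + 2 * (2 ^ i * (m / 2 / 2 ^ i) + m / 2 % 2 ^ i) := by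
        rw [Nat.div_add_mod (m / 2) (2 ^ i)]
    _ = (m % 2 + 2 * (m / 2 % 2 ^ i)) + (2 * 2 ^ i) * (m / 2 / 2 ^ i) := by ring
  rw [pow_succ, mul_comm (2 ^ i) 2]
  conv_lhs => rw [hm]
  rw [Nat.add_mul_mod_self_left]
  exact Nat.mod_eq_of_lt (by have := Nat.mod_lt (m / 2) hk; omega)

theorem div_pow_succ_two (m i : Nat) : m / 2 ^ (i + 1) = (m / 2) / 2 ^ i := by
  rw [pow_succ, mul_comm, Nat.div_div_eq_div_mul]

-- the key correspondence: labelling the LSB-first digit list equals the per-position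
-- shift/mask formulation
theorem gSpec_getBitsAux (m : Nat) : ∀ c : Int,
    gSpec (getBitsAux m) c = (List.range (bitLength m)).map (fun i =>
      if m / 2 ^ i % 2 = 1 then (0 : Int) else c + (popcount (m % 2 ^ i) : Int)) := by
  induction m using getBitsAux.induct with
  | case1 => intro c; simp [getBitsAux, bitLength, gSpec]
  | case2 k ih =>
    intro c
    rw [getBitsAux, bitLength, if_neg (Nat.succ_ne_zero k)]
    rw [List.range_succ_eq_map]
    simp only [List.map_cons, List.map_map]
    rcases Nat.mod_two_eq_zero_or_one (k+1) with h | h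
    · -- even: head is a zero bit labelled c (popcount of m % 2^0 = 0)
      rw [gSpec]
      simp only [h, Nat.cast_zero]
      rw [if_neg (by simp)]
      congr 1
      · simp [pow_zero, Nat.div_one, Nat.mod_one, h, popcount_zero]
      · rw [ih c]
        apply List.map_congr_left
        intro i _
        simp only [Function.comp, Nat.succ_eq_add_one]
        rw [div_pow_succ_two, mod_pow_succ_two, h, popcount_bit 0 _ (by omega)]
        simp
    · -- odd: head is a one bit labelled 0, counter increments
      rw [gSpec]
      simp only [h, Nat.cast_one]
      rw [if_pos (by simp)]
      congr 1
      · simp [pow_zero, Nat.div_one, h]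
      · rw [ih (c + 1)]
        apply List.map_congr_left
        intro i _
        simp only [Function.comp, Nat.succ_eq_add_one]
        rw [div_pow_succ_two, mod_pow_succ_two, h, popcount_bit 1 _ (by omega)]
        split_ifs with hb
        · rfl
        · push_cast
          ring

-- ===== VERDICT (by name: the statement is the Claim_ definition above) =====
theorem decorate_zeroes_spec : Claim_equal_decorate_zeroes := by
  intro width n _ hn
  unfold Spec_decorate_zeroes decorate_zeroes decorate_zeroes_alt
  simp only []
  rw [foldA]
  by_cases h0 : n = 0
  · subst h0
    simp [get_bits, gSpec, bitLength, popcount_zero, List.range_succ]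
  · have hn' : (0 : Int) ≤ n := hn
    have hm : n.toNat ≠ 0 := by
      intro h; exact h0 (by omega)
    rw [get_bits, if_neg h0, List.reverse_reverse, List.length_reverse, len_getBitsAux,
      sum_getBitsAux, onesI_getBitsAux, gSpec_getBitsAux,
      Nat.max_eq_left (bitLength_pos _ hm)]
    have hfun : ∀ i ∈ List.range (bitLength n.toNat),
        (if n.toNat / 2 ^ i % 2 = 1 then (0 : Int) else 0 + (popcount (n.toNat % 2 ^ i) : Int))
        = (if (n.toNat >>> i) &&& 1 == 1 then (0 : Int)
           else (popcount (n.toNat &&& (1 <<< i - 1)) : Int)) := by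
      intro i _
      rw [Nat.shiftRight_eq_div_pow, Nat.and_one_is_mod, Nat.one_shiftLeft,
        Nat.and_two_pow_sub_one_eq_mod]
      by_cases h : n.toNat / 2 ^ i % 2 = 1 <;> simp [h]
    rw [List.map_congr_left hfun]
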